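-- pv_equiv track=rewrite | github.com/cloud-pulse/sre-rca-tool | core/sre_investigator.py | _detect_mock_scenario
-- ===== SOURCE A (Python) =====
-- def _detect_mock_scenario(
--                            log_lines: list
--                            ) -> str:
--     joined = "\n".join(
--         log_lines
--     ).lower()
--     if any(k in joined for k in [
--         "oomkill", "out of memory",
--         "memory limit"
--     ]):
--         return "oom-killed"
--     if any(k in joined for k in [
--         "secret", "keyvault",
--         "vault", "credential"
--     ]):
--         return "secret-missing"
--     if any(k in joined for k in [
--         "imagepull", "image pull",
--         "errimagepull"
--     ]):
--         return "image-pull-backoff"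
--     if any(k in joined for k in [
--         "pvc", "persistentvolume",
--         "volume mount", "failedmount"
--     ]):
--         return "pvc-not-bound"
--     if any(k in joined for k in [
--         "liveness probe", "readiness probe",
--         "probe failed"
--     ]):
--         return "probe-failure"
--     if any(k in joined for k in [
--         "evict", "node pressure",
--         "diskpressure", "memorypressure"
--     ]):
--         return "node-pressure"
--     if any(k in joined for k in [
--         "istio", "envoy", "sidecar"
--     ]):
--         return "istio-crash"
--     return "connection-pool-exhaustion"
-- ===== SOURCE B (Python) =====
-- # Flat keyword -> label table; priority = order labels first appear.
-- KEYWORDS = [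
--     ("oomkill", "oom-killed"), ("out of memory", "oom-killed"), ("memory limit", "oom-killed"),
--     ("secret", "secret-missing"), ("keyvault", "secret-missing"), ("vault", "secret-missing"), ("credential", "secret-missing"),
--     ("imagepull", "image-pull-backoff"), ("image pull", "image-pull-backoff"), ("errimagepull", "image-pull-backoff"),
--     ("pvc", "pvc-not-bound"), ("persistentvolume", "pvc-not-bound"), ("volume mount", "pvc-not-bound"), ("failedmount", "pvc-not-bound"),
--     ("liveness probe", "probe-failure"), ("readiness probe", "probe-failure"), ("probe failed", "probe-failure"),
--     ("evict", "node-pressure"), ("node pressure", "node-pressure"), ("diskpressure", "node-pressure"), ("memorypressure", "node-pressure"),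
--     ("istio", "istio-crash"), ("envoy", "istio-crash"), ("sidecar", "istio-crash"),
-- ]
-- LABELS = ["oom-killed", "secret-missing", "image-pull-backoff", "pvc-not-bound",
--           "probe-failure", "node-pressure", "istio-crash"]
--
-- # first-character index: only keywords starting with joined[i] are tried at position i
-- BY_FIRST = {}
-- for _kw, _label in KEYWORDS:
--     BY_FIRST.setdefault(_kw[0], []).append((_kw, _label))
--
-- def _detect_mock_scenario(log_lines: list) -> str:
--     joined = "\n".join(log_lines).lower()
--     # single sliding scan over the text: collect every label whose keyword starts at i
--     hits = set()
--     for i in range(len(joined)):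
--         for kw, label in BY_FIRST.get(joined[i], ()):
--             if joined.startswith(kw, i):
--                 hits.add(label)
--     # resolve by priority
--     for label in LABELS:
--         if label in hits:
--             return label
--     return "connection-pool-exhaustion"
-- ===== Notes on version B (the rewrite author's own statement) =====
-- stated objective: alternative
-- what changed: Replaced seven per-scenario short-circuit any(k in joined) branches with a single text-driven sliding scan: a first-character dict index of a flat keyword->label table is consulted at each position of the joined text to collect the set of all matched labels, and the verdict is resolved afterwards by a separate priority pass over the label order.
import Mathlib
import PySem

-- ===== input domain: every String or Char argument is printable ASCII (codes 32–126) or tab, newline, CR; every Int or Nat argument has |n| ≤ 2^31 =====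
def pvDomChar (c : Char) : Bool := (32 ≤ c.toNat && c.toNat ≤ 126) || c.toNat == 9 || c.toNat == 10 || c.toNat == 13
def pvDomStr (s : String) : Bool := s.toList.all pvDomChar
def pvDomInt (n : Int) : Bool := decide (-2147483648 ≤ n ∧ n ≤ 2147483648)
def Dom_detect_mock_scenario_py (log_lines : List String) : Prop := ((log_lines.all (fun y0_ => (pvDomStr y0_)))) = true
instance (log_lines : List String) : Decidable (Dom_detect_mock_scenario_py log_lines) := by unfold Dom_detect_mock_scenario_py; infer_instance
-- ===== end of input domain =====

-- B replaces A's seven per-scenario short-circuit any(k in joined) branches with one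
-- text-driven sliding scan collecting the set of all matched labels (flat keyword->label
-- table, consulted through a first-character dict index), resolved afterwards by a
-- priority pass over the label order (objective: alternative).


-- ===== PORT A =====
def detect_mock_scenario_py (log_lines : List String) : String :=
  let joined := PySem.Str.lower (PySem.Str.join "\n" log_lines)
  if ["oomkill", "out of memory", "memory limit"].any (fun k => PySem.Str.isIn k joined) then
    "oom-killed"
  else if ["secret", "keyvault", "vault", "credential"].any (fun k => PySem.Str.isIn k joined) then
    "secret-missing"
  else if ["imagepull", "image pull", "errimagepull"].any (fun k => PySem.Str.isIn k joined) then
    "image-pull-backoff"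
  else if ["pvc", "persistentvolume", "volume mount", "failedmount"].any (fun k => PySem.Str.isIn k joined) then
    "pvc-not-bound"
  else if ["liveness probe", "readiness probe", "probe failed"].any (fun k => PySem.Str.isIn k joined) then
    "probe-failure"
  else if ["evict", "node pressure", "diskpressure", "memorypressure"].any (fun k => PySem.Str.isIn k joined) then
    "node-pressure"
  else if ["istio", "envoy", "sidecar"].any (fun k => PySem.Str.isIn k joined) then
    "istio-crash"
  else
    "connection-pool-exhaustion"

-- ===== PORT B =====
-- the flat keyword -> label table (KEYWORDS in Source B)
def pvKeywords : List (String × String) :=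
  [("oomkill", "oom-killed"), ("out of memory", "oom-killed"), ("memory limit", "oom-killed"),
   ("secret", "secret-missing"), ("keyvault", "secret-missing"), ("vault", "secret-missing"), ("credential", "secret-missing"),
   ("imagepull", "image-pull-backoff"), ("image pull", "image-pull-backoff"), ("errimagepull", "image-pull-backoff"),
   ("pvc", "pvc-not-bound"), ("persistentvolume", "pvc-not-bound"), ("volume mount", "pvc-not-bound"), ("failedmount", "pvc-not-bound"),
   ("liveness probe", "probe-failure"), ("readiness probe", "probe-failure"), ("probe failed", "probe-failure"),
   ("evict", "node-pressure"), ("node pressure", "node-pressure"), ("diskpressure", "node-pressure"), ("memorypressure", "node-pressure"),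
   ("istio", "istio-crash"), ("envoy", "istio-crash"), ("sidecar", "istio-crash")]

-- the label priority order (LABELS in Source B)
def pvLabels : List String :=
  ["oom-killed", "secret-missing", "image-pull-backoff", "pvc-not-bound",
   "probe-failure", "node-pressure", "istio-crash"]

-- BY_FIRST: first-character index, built exactly like Source B's setdefault/append loop
-- (kw[0] -> headD: every keyword in the table is nonempty, so the default is never used)
def pvByFirst : PySem.Dict Char (List (String × String)) :=
  pvKeywords.foldl
    (fun d p => PySem.Dict.modify d (p.1.toList.headD ' ') [] (fun l => l ++ [p]))
    PySem.Dict.empty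

-- sliding scan: for i in range(len(joined)): for kw,label in BY_FIRST.get(joined[i], ()):
--   if joined.startswith(kw, i): hits.add(label)
-- (i ranges over 0..len-1, so joined[i] is exact as cs.getD i ' ' — the default is never
--  used — and joined.startswith(kw, i) is PySem.Chars.startswith (cs.drop i) kw)
def pvHits (cs : List Char) : PySem.Set String :=
  (List.range cs.length).foldl
    (fun s i => (PySem.Dict.getD pvByFirst (cs.getD i ' ') []).foldl
      (fun s p => if PySem.Chars.startswith (cs.drop i) p.1.toList then PySem.Set.add s p.2 else s) s)
    PySem.Set.empty

-- priority pass: for label in LABELS: if label in hits: return label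
def pvPick (hits : PySem.Set String) : List String → String
  | [] => "connection-pool-exhaustion"
  | l :: rest => if PySem.Set.contains hits l then l else pvPick hits rest

def detect_mock_scenario_py_alt (log_lines : List String) : String :=
  let joined := PySem.Str.lower (PySem.Str.join "\n" log_lines)
  pvPick (pvHits joined.toList) pvLabels

-- ===== PRECONDITION & SPEC =====
def Spec_detect_mock_scenario_py (log_lines : List String) (out : String) : Prop := out = detect_mock_scenario_py_alt log_lines
instance (log_lines : List String) (out : String) : Decidable (Spec_detect_mock_scenario_py log_lines out) := by unfold Spec_detect_mock_scenario_py; infer_instance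

-- ===== CLAIM (what is proved, stated in full; the proofs are below) =====
def Claim_equal_detect_mock_scenario_py : Prop := ∀ (log_lines : List String), Dom_detect_mock_scenario_py log_lines → Spec_detect_mock_scenario_py log_lines (detect_mock_scenario_py log_lines)

-- ===== LEMMAS AND PROOFS =====

-- the value BY_FIRST evaluates to (used only by the proofs)
def pvByFirstLit : PySem.Dict Char (List (String × String)) :=
  ((((((((((((((PySem.Dict.empty.insert
    'o' [("oomkill", "oom-killed"), ("out of memory", "oom-killed")]).insert
    'm' [("memory limit", "oom-killed"), ("memorypressure", "node-pressure")]).insert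
    's' [("secret", "secret-missing"), ("sidecar", "istio-crash")]).insert
    'k' [("keyvault", "secret-missing")]).insert
    'v' [("vault", "secret-missing"), ("volume mount", "pvc-not-bound")]).insert
    'c' [("credential", "secret-missing")]).insert
    'i' [("imagepull", "image-pull-backoff"), ("image pull", "image-pull-backoff"), ("istio", "istio-crash")]).insert
    'e' [("errimagepull", "image-pull-backoff"), ("evict", "node-pressure"), ("envoy", "istio-crash")]).insert
    'p' [("pvc", "pvc-not-bound"), ("persistentvolume", "pvc-not-bound"), ("probe failed", "probe-failure")]).insert
    'f' [("failedmount", "pvc-not-bound")]).insert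
    'l' [("liveness probe", "probe-failure")]).insert
    'r' [("readiness probe", "probe-failure")]).insert
    'n' [("node pressure", "node-pressure")]).insert
    'd' [("diskpressure", "node-pressure")])

set_option maxRecDepth 8000 in
theorem pvByFirst_eq : pvByFirst = pvByFirstLit := by decide

-- membership in the inner keyword fold (generic in the keyword list)
theorem mem_inner_fold (cs : List Char) (i : Nat) (kws : List (String × String))
    (s : PySem.Set String) (l : String) :
    l ∈ kws.foldl
      (fun s p => if PySem.Chars.startswith (cs.drop i) p.1.toList then PySem.Set.add s p.2 else s) s
    ↔ l ∈ s ∨ ∃ p ∈ kws, PySem.Chars.startswith (cs.drop i) p.1.toList = true ∧ l = p.2 := by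
  induction kws generalizing s with
  | nil => simp
  | cons p rest ih =>
    simp only [List.foldl_cons]
    by_cases h : PySem.Chars.startswith (cs.drop i) p.1.toList = true
    · rw [if_pos h, ih]
      simp [PySem.Set.mem_add, h]
      tauto
    · rw [if_neg h, ih]
      simp only [List.mem_cons]
      constructor
      · rintro (hs | ⟨q, hq, hst, hl⟩)
        · exact Or.inl hs
        · exact Or.inr ⟨q, Or.inr hq, hst, hl⟩
      · rintro (hs | ⟨q, (rfl | hq), hst, hl⟩)
        · exact Or.inl hs
        · exact absurd hst h
        · exact Or.inr ⟨q, hq, hst, hl⟩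

-- membership in the outer position fold, with a position-dependent bucket
theorem mem_outer_fold (cs : List Char) (kwsAt : Nat → List (String × String))
    (idxs : List Nat) (s : PySem.Set String) (l : String) :
    l ∈ idxs.foldl
      (fun s i => (kwsAt i).foldl
        (fun s p => if PySem.Chars.startswith (cs.drop i) p.1.toList then PySem.Set.add s p.2 else s) s) s
    ↔ l ∈ s ∨ ∃ i ∈ idxs, ∃ p ∈ kwsAt i, PySem.Chars.startswith (cs.drop i) p.1.toList = true ∧ l = p.2 := by
  induction idxs generalizing s with
  | nil => simp
  | cons i rest ih =>
    simp only [List.foldl_cons]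
    rw [ih, mem_inner_fold]
    simp only [List.mem_cons]
    constructor
    · rintro ((hs | ⟨p, hp, hst, hl⟩) | ⟨j, hj, p, hp, hst, hl⟩)
      · exact Or.inl hs
      · exact Or.inr ⟨i, Or.inl rfl, p, hp, hst, hl⟩
      · exact Or.inr ⟨j, Or.inr hj, p, hp, hst, hl⟩
    · rintro (hs | ⟨j, (rfl | hj), p, hp, hst, hl⟩)
      · exact Or.inl (Or.inl hs)
      · exact Or.inl (Or.inr ⟨p, hp, hst, hl⟩)
      · exact Or.inr ⟨j, hj, p, hp, hst, hl⟩

-- every table keyword is nonempty and sits in the bucket of its first character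
set_option maxRecDepth 8000 in
theorem pvKeywords_bucket :
    ∀ p ∈ pvKeywords, p.1.toList ≠ [] ∧ p ∈ PySem.Dict.getD pvByFirst (p.1.toList.headD ' ') [] := by
  decide

-- every bucket element comes from the table, with matching first character
theorem pvBucket_mem (c : Char) (p : String × String)
    (hp : p ∈ PySem.Dict.getD pvByFirst c []) :
    p ∈ pvKeywords ∧ p.1.toList.headD ' ' = c := by
  rw [pvByFirst_eq] at hp
  unfold pvByFirstLit at hp
  rw [PySem.Dict.getD_insert] at hp
  by_cases hKd : c = 'd'
  · subst hKd
    rw [if_pos rfl] at hp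
    fin_cases hp <;> decide
  rw [if_neg hKd] at hp
  rw [PySem.Dict.getD_insert] at hp
  by_cases hKn : c = 'n'
  · subst hKn
    rw [if_pos rfl] at hp
    fin_cases hp <;> decide
  rw [if_neg hKn] at hp
  rw [PySem.Dict.getD_insert] at hp
  by_cases hKr : c = 'r'
  · subst hKr
    rw [if_pos rfl] at hp
    fin_cases hp <;> decide
  rw [if_neg hKr] at hp
  rw [PySem.Dict.getD_insert] at hp
  by_cases hKl : c = 'l'
  · subst hKl
    rw [if_pos rfl] at hp
    fin_cases hp <;> decide
  rw [if_neg hKl] at hp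
  rw [PySem.Dict.getD_insert] at hp
  by_cases hKf : c = 'f'
  · subst hKf
    rw [if_pos rfl] at hp
    fin_cases hp <;> decide
  rw [if_neg hKf] at hp
  rw [PySem.Dict.getD_insert] at hp
  by_cases hKp : c = 'p'
  · subst hKp
    rw [if_pos rfl] at hp
    fin_cases hp <;> decide
  rw [if_neg hKp] at hp
  rw [PySem.Dict.getD_insert] at hp
  by_cases hKe : c = 'e'
  · subst hKe
    rw [if_pos rfl] at hp
    fin_cases hp <;> decide
  rw [if_neg hKe] at hp
  rw [PySem.Dict.getD_insert] at hp
  by_cases hKi : c = 'i'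
  · subst hKi
    rw [if_pos rfl] at hp
    fin_cases hp <;> decide
  rw [if_neg hKi] at hp
  rw [PySem.Dict.getD_insert] at hp
  by_cases hKc : c = 'c'
  · subst hKc
    rw [if_pos rfl] at hp
    fin_cases hp <;> decide
  rw [if_neg hKc] at hp
  rw [PySem.Dict.getD_insert] at hp
  by_cases hKv : c = 'v'
  · subst hKv
    rw [if_pos rfl] at hp
    fin_cases hp <;> decide
  rw [if_neg hKv] at hp
  rw [PySem.Dict.getD_insert] at hp
  by_cases hKk : c = 'k'
  · subst hKk
    rw [if_pos rfl] at hp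
    fin_cases hp <;> decide
  rw [if_neg hKk] at hp
  rw [PySem.Dict.getD_insert] at hp
  by_cases hKs : c = 's'
  · subst hKs
    rw [if_pos rfl] at hp
    fin_cases hp <;> decide
  rw [if_neg hKs] at hp
  rw [PySem.Dict.getD_insert] at hp
  by_cases hKm : c = 'm'
  · subst hKm
    rw [if_pos rfl] at hp
    fin_cases hp <;> decide
  rw [if_neg hKm] at hp
  rw [PySem.Dict.getD_insert] at hp
  by_cases hKo : c = 'o'
  · subst hKo
    rw [if_pos rfl] at hp
    fin_cases hp <;> decide
  rw [if_neg hKo] at hp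
  rw [PySem.Dict.getD_empty] at hp
  exact absurd hp (List.not_mem_nil)

-- a keyword matching at a valid position starts with the character at that position
theorem getD_of_startswith (cs : List Char) (i : Nat)
    (h : Char) (t : List Char)
    (hst : PySem.Chars.startswith (cs.drop i) (h :: t) = true) :
    cs.getD i ' ' = h := by
  obtain ⟨r, hr⟩ := (PySem.Chars.startswith_iff _ _).mp hst
  have h0 : cs[i]? = some h := by
    have h1 : (List.drop i cs)[0]? = cs[i + 0]? := List.getElem?_drop
    rw [Nat.add_zero] at h1
    rw [← h1, ← hr]
    rfl
  simp [List.getD_eq_getElem?_getD, h0]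

-- at a valid position, scanning the bucket of cs[i] is the same as scanning the whole table
theorem bucket_match_iff (cs : List Char) (i : Nat)
    (p : String × String) :
    (p ∈ PySem.Dict.getD pvByFirst (cs.getD i ' ') [] ∧
      PySem.Chars.startswith (cs.drop i) p.1.toList = true)
    ↔ (p ∈ pvKeywords ∧ PySem.Chars.startswith (cs.drop i) p.1.toList = true) := by
  constructor
  · rintro ⟨hp, hst⟩
    exact ⟨(pvBucket_mem _ p hp).1, hst⟩
  · rintro ⟨hp, hst⟩
    obtain ⟨hne, hb⟩ := pvKeywords_bucket p hp
    obtain ⟨h, t, hht⟩ : ∃ h t, p.1.toList = h :: t := by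
      cases h' : p.1.toList with
      | nil => exact absurd h' hne
      | cons a b => exact ⟨a, b, rfl⟩
    have hc : cs.getD i ' ' = h := getD_of_startswith cs i h t (by rwa [hht] at hst)
    refine ⟨?_, hst⟩
    rw [hc, ← show p.1.toList.headD ' ' = h by rw [hht]; rfl]
    exact hb

-- bounded positions suffice: a nonempty keyword matches somewhere iff it matches at some i < length
theorem exists_range_startswith_iff (cs kw : List Char) (hne : kw ≠ []) :
    (∃ i ∈ List.range cs.length, PySem.Chars.startswith (cs.drop i) kw = true)
    ↔ PySem.Chars.isIn kw cs = true := by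
  rw [← PySem.Chars.exists_prefix_drop_iff_isIn]
  constructor
  · rintro ⟨i, _, hst⟩
    exact ⟨i, (PySem.Chars.startswith_iff _ _).mp hst⟩
  · rintro ⟨j, hpre⟩
    by_cases hj : j < cs.length
    · exact ⟨j, List.mem_range.mpr hj, (PySem.Chars.startswith_iff _ _).mpr hpre⟩
    · exfalso
      rw [List.drop_eq_nil_of_le (by omega : cs.length ≤ j)] at hpre
      exact hne (List.prefix_nil.mp hpre)

-- full characterisation of the hit set
theorem mem_pvHits (cs : List Char) (l : String) :
    l ∈ pvHits cs ↔ ∃ p ∈ pvKeywords, PySem.Chars.isIn p.1.toList cs = true ∧ l = p.2 := by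
  unfold pvHits
  rw [mem_outer_fold]
  constructor
  · rintro (hs | ⟨i, hi, p, hp, hst, hl⟩)
    · cases hs
    · have hp' := ((bucket_match_iff cs i p).mp ⟨hp, hst⟩).1
      have hne := (pvKeywords_bucket p hp').1
      exact ⟨p, hp', (exists_range_startswith_iff cs p.1.toList hne).mp ⟨i, hi, hst⟩, hl⟩
  · rintro ⟨p, hp, hin, hl⟩
    have hne := (pvKeywords_bucket p hp).1
    obtain ⟨i, hi, hst⟩ := (exists_range_startswith_iff cs p.1.toList hne).mpr hin
    exact Or.inr ⟨i, hi, p, ((bucket_match_iff cs i p).mpr ⟨hp, hst⟩).1, hst, hl⟩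

-- per-label: membership of a label in the hit set = A's per-scenario any
theorem contains_pvHits (cs : List Char) (lab : String) (kws : List String)
    (h : ∀ kw : String, (kw, lab) ∈ pvKeywords ↔ kw ∈ kws) :
    PySem.Set.contains (pvHits cs) lab = kws.any (fun k => PySem.Chars.isIn k.toList cs) := by
  rw [Bool.eq_iff_iff, PySem.Set.contains_iff, mem_pvHits, List.any_eq_true]
  constructor
  · rintro ⟨⟨kw, l⟩, hp, hin, rfl⟩
    exact ⟨kw, (h kw).mp hp, hin⟩
  · rintro ⟨kw, hkw, hin⟩
    exact ⟨(kw, lab), (h kw).mpr hkw, hin, rfl⟩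

-- ===== VERDICT (by name: the statement is the Claim_ definition above) =====
theorem detect_mock_scenario_py_spec : Claim_equal_detect_mock_scenario_py := by
  intro log_lines _
  unfold Spec_detect_mock_scenario_py detect_mock_scenario_py detect_mock_scenario_py_alt
  simp only []
  set joined := PySem.Str.lower (PySem.Str.join "\n" log_lines) with hj
  have h1 := contains_pvHits joined.toList "oom-killed" ["oomkill", "out of memory", "memory limit"]
    (by intro kw; unfold pvKeywords; simp)
  have h2 := contains_pvHits joined.toList "secret-missing" ["secret", "keyvault", "vault", "credential"]
    (by intro kw; unfold pvKeywords; simp)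
  have h3 := contains_pvHits joined.toList "image-pull-backoff" ["imagepull", "image pull", "errimagepull"]
    (by intro kw; unfold pvKeywords; simp)
  have h4 := contains_pvHits joined.toList "pvc-not-bound" ["pvc", "persistentvolume", "volume mount", "failedmount"]
    (by intro kw; unfold pvKeywords; simp)
  have h5 := contains_pvHits joined.toList "probe-failure" ["liveness probe", "readiness probe", "probe failed"]
    (by intro kw; unfold pvKeywords; simp)
  have h6 := contains_pvHits joined.toList "node-pressure" ["evict", "node pressure", "diskpressure", "memorypressure"]
    (by intro kw; unfold pvKeywords; simp)
  have h7 := contains_pvHits joined.toList "istio-crash" ["istio", "envoy", "sidecar"]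
    (by intro kw; unfold pvKeywords; simp)
  simp only [pvLabels, pvPick]
  rw [h1, h2, h3, h4, h5, h6, h7]
  simp only [PySem.Str.isIn_eq]
  rfl
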